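-- pv_equiv track=rewrite | github.com/jizhuoran/caffe-huawei-atlas-convertor | convertor/huawei/impl/five_2_four_int8.py | _cal_core
-- ===== SOURCE A (Python) =====
-- def _cal_core(total_core_loop_num, core_number, device_core_num):
--     """
--     calculate the loop number on each core
--
--     input:
--     total_core_loop_num : Virtual computing cores
--     core_number : Actual cores
--     device_core_num : Physical cores
--
--     return:
--     split_block_index : Watershed of different core
--     list_out[i][0] : [0:i]  core_loop
--     list_out[i+1][0]: [i+1,:] core_loop
--     """
--     list_out = []
--     for block_index in range(core_number):
--         core_loop = total_core_loop_num // core_number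
--         sum_core = ((core_loop + 1) * (total_core_loop_num % device_core_num) +
--                     core_loop * (block_index - total_core_loop_num %
--                                  device_core_num))
--         if block_index < total_core_loop_num % device_core_num:
--             core_loop = ((total_core_loop_num + core_number - 1) //
--                          core_number)
--             sum_core = (core_loop * block_index)
--
--         list_in = [core_loop, sum_core]
--         list_out.append(list_in)
--
--     split_core_index = 0
--     for i in range(len(list_out)-1):
--         if list_out[i][0] != list_out[i+1][0]:
--             return i, list_out[i][0], list_out[i+1][0]
--         split_core_index += 1
--
--     return split_core_index, list_out[0][0], list_out[0][0]
-- ===== SOURCE B (Python) =====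
-- def _cal_core(total_core_loop_num, core_number, device_core_num):
--     """Closed-form: the split index is r-1 where r = total % device_core_num,
--     whenever 0 < r < core_number and ceil != floor; otherwise all cores get the
--     same loop count and the index is core_number-1."""
--     floor_loop = total_core_loop_num // core_number
--     ceil_loop = (total_core_loop_num + core_number - 1) // core_number
--     r = total_core_loop_num % device_core_num
--     if 0 < r < core_number and ceil_loop != floor_loop:
--         return r - 1, ceil_loop, floor_loop
--     head = ceil_loop if r > 0 else floor_loop
--     return core_number - 1, head, head
-- ===== Notes on version B (the rewrite author's own statement) =====
-- stated objective: faster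
-- what changed: B computes the split boundary in closed form from r = total_core_loop_num % device_core_num (split at r-1 when 0 < r < core_number and ceil != floor division, else core_number-1) instead of building a per-core list and scanning it for the first change.
import Mathlib
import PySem

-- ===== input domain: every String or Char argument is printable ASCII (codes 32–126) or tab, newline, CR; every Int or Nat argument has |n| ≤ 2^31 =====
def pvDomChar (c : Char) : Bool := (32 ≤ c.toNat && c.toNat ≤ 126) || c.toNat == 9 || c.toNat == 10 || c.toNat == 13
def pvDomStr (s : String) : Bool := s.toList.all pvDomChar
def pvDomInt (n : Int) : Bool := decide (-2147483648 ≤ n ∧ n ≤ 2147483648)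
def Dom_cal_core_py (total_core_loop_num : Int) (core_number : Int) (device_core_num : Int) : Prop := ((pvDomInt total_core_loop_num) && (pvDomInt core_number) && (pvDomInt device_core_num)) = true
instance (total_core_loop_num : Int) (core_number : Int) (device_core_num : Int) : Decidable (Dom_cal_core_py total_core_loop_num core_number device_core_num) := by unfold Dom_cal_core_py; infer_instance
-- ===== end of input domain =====

-- B replaces A's per-core list construction and linear boundary scan by an O(1) closed form
-- (boundary at r - 1 where r = total_core_loop_num % device_core_num); same return value on all of Pre_.
-- The Python functions return a 3-tuple; per the type convention it is ported as a 3-element List Int.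

-- ===== PORT A =====
-- first loop of A: list_out[block_index] = (core_loop, sum_core)
def pvMakeList (total_core_loop_num core_number device_core_num : Int) : List (Int × Int) :=
  (PySem.List.pyRange 0 core_number 1).map (fun block_index =>
    let core_loop := PySem.Int.floordiv total_core_loop_num core_number
    let sum_core := (core_loop + 1) * PySem.Int.mod total_core_loop_num device_core_num +
                    core_loop * (block_index - PySem.Int.mod total_core_loop_num device_core_num)
    if block_index < PySem.Int.mod total_core_loop_num device_core_num then
      let core_loop := PySem.Int.floordiv (total_core_loop_num + core_number - 1) core_number
      (core_loop, core_loop * block_index)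
    else (core_loop, sum_core))


-- second loop of A: 'for i in range(len(list_out)-1): if list_out[i][0] != list_out[i+1][0]: return …'
def pvFindSplit : List (Int × Int) → Int → Option (Int × Int × Int)
  | a :: b :: rest, i => if a.1 ≠ b.1 then some (i, a.1, b.1) else pvFindSplit (b :: rest) (i + 1)
  | _, _ => none


def cal_core_py (total_core_loop_num : Int) (core_number : Int) (device_core_num : Int) : List Int :=
  let list_out := pvMakeList total_core_loop_num core_number device_core_num
  match pvFindSplit list_out 0 with
  | some (i, x, y) => [i, x, y]
  | none =>
    match list_out with
    | [] => []
    | p :: _ => [(list_out.length : Int) - 1, p.1, p.1]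


-- ===== PORT B =====
def cal_core_py_alt (total_core_loop_num : Int) (core_number : Int) (device_core_num : Int) : List Int :=
  let floor_loop := PySem.Int.floordiv total_core_loop_num core_number
  let ceil_loop := PySem.Int.floordiv (total_core_loop_num + core_number - 1) core_number
  let r := PySem.Int.mod total_core_loop_num device_core_num
  if 0 < r ∧ r < core_number ∧ ceil_loop ≠ floor_loop then
    [r - 1, ceil_loop, floor_loop]
  else
    let head := if 0 < r then ceil_loop else floor_loop
    [core_number - 1, head, head]


-- ===== PRECONDITION & SPEC =====
-- Pre_ excludes exactly the inputs where Python A raises: core_number < 1 (list_out is empty and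
-- list_out[0] raises IndexError, or '//' by core_number = 0 raises) and device_core_num = 0 ('%' raises).
def Pre_cal_core_py (total_core_loop_num : Int) (core_number : Int) (device_core_num : Int) : Prop :=
  1 ≤ core_number ∧ device_core_num ≠ 0
instance (total_core_loop_num : Int) (core_number : Int) (device_core_num : Int) : Decidable (Pre_cal_core_py total_core_loop_num core_number device_core_num) := by unfold Pre_cal_core_py; infer_instance

def pvWitness_cal_core_py : Int × Int × Int := (17, 5, 4)

def Spec_cal_core_py (total_core_loop_num : Int) (core_number : Int) (device_core_num : Int) (out : List Int) : Prop := out = cal_core_py_alt total_core_loop_num core_number device_core_num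
instance (total_core_loop_num : Int) (core_number : Int) (device_core_num : Int) (out : List Int) : Decidable (Spec_cal_core_py total_core_loop_num core_number device_core_num out) := by unfold Spec_cal_core_py; infer_instance

-- ===== CLAIM (what is proved, stated in full; the proofs are below) =====
def Claim_equal_cal_core_py : Prop := ∀ (total_core_loop_num : Int) (core_number : Int) (device_core_num : Int), Dom_cal_core_py total_core_loop_num core_number device_core_num → Pre_cal_core_py total_core_loop_num core_number device_core_num → Spec_cal_core_py total_core_loop_num core_number device_core_num (cal_core_py total_core_loop_num core_number device_core_num)

-- ===== LEMMAS AND PROOFS =====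

-- the second loop of A reads only the first components: a scan over that projection
def pvScanFst : List Int → Int → Option (Int × Int × Int)
  | a :: b :: rest, i => if a ≠ b then some (i, a, b) else pvScanFst (b :: rest) (i + 1)
  | _, _ => none


theorem pvFindSplit_eq_scanFst (l : List (Int × Int)) (i : Int) :
    pvFindSplit l i = pvScanFst (l.map Prod.fst) i := by
  induction l generalizing i with
  | nil => simp [pvFindSplit, pvScanFst]
  | cons a tail ih =>
    cases tail with
    | nil => simp [pvFindSplit, pvScanFst]
    | cons b rest =>
      by_cases h : a.1 = b.1
      · simp [pvFindSplit, pvScanFst, h, ih]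
      · simp [pvFindSplit, pvScanFst, h]

theorem pvScanFst_replicate (m : Nat) (x : Int) (i : Int) :
    pvScanFst (List.replicate m x) i = none := by
  induction m generalizing i with
  | zero => simp [pvScanFst]
  | succ k ih =>
    cases k with
    | zero => simp [pvScanFst]
    | succ j =>
      rw [List.replicate_succ, List.replicate_succ]
      simp only [pvScanFst, ne_eq, not_true_eq_false, if_false]
      rw [← List.replicate_succ]
      exact ih (i + 1)

theorem pvScanFst_two_blocks (a b : Nat) (x y : Int) (i : Int)
    (ha : 1 ≤ a) (hb : 1 ≤ b) (hxy : x ≠ y) :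
    pvScanFst (List.replicate a x ++ List.replicate b y) i = some (i + a - 1, x, y) := by
  induction a generalizing i with
  | zero => omega
  | succ k ih =>
    cases k with
    | zero =>
      obtain ⟨b', rfl⟩ : ∃ b', b = b' + 1 := ⟨b - 1, by omega⟩
      simp [pvScanFst, List.replicate_succ, hxy]
    | succ j =>
      rw [List.replicate_succ, List.replicate_succ]
      simp only [List.cons_append, pvScanFst, ne_eq, not_true_eq_false, if_false]
      rw [← List.cons_append, ← List.replicate_succ]
      rw [ih (i + 1) (by omega)]
      congr 1
      push_cast
      ring_nf

theorem pvFirsts_eq (n : Nat) (r x y : Int) :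
    (List.range n).map (fun j : Nat => if (j : Int) < r then x else y) =
      List.replicate (min r.toNat n) x ++ List.replicate (n - min r.toNat n) y := by
  set k := min r.toNat n with hk
  have hkn : k ≤ n := min_le_right _ _
  have h1 : n = k + (n - k) := by omega
  rw [h1, List.range_add, List.map_append, List.map_map]
  congr 1
  · have : ∀ j ∈ List.range k, (fun j : Nat => if (j : Int) < r then x else y) j = (fun _ => x) j := by
      intro j hj
      simp only [List.mem_range] at hj
      have : (j : Int) < r := by omega
      simp [this]
    rw [List.map_congr_left this, List.map_const']
    simp
  · have : ∀ j ∈ List.range (n - k),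
        ((fun j : Nat => if (j : Int) < r then x else y) ∘ (fun x : Nat => k + x)) j = (fun _ => y) j := by
      intro j hj
      simp only [List.mem_range] at hj
      have hkr : k = r.toNat := by omega
      have : ¬ ((k : Int) + (j : Int) < r) := by omega
      simp [Function.comp, this]
    rw [List.map_congr_left this, List.map_const']
    simp


theorem pvHead_blocks (a b : Nat) (x y : Int) (h : 1 ≤ a + b) :
    (List.replicate a x ++ List.replicate b y).head? = some (if a = 0 then y else x) := by
  cases a with
  | zero =>
    cases b with
    | zero => omega
    | succ b' => simp [List.replicate_succ]
  | succ a' => simp [List.replicate_succ]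


theorem pvMain (t c d : Int) (hc : 1 ≤ c) (_hd : d ≠ 0) :
    cal_core_py t c d = cal_core_py_alt t c d := by
  have hrng : PySem.List.pyRange 0 c 1 = (List.range (c).toNat).map (fun k : Nat => (k : Int)) := by
    rw [PySem.List.pyRange_one]
    simp
  set r := PySem.Int.mod t d with hr
  set fl := PySem.Int.floordiv t c with hfl
  set ce := PySem.Int.floordiv (t + c - 1) c with hce
  set n := c.toNat with hn
  have hn1 : 1 ≤ n := by omega
  have hcn : (n : Int) = c := by omega
  have hmap : (pvMakeList t c d).map Prod.fst
      = (List.range n).map (fun j : Nat => if (j : Int) < r then ce else fl) := by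
    unfold pvMakeList
    rw [hrng, List.map_map, List.map_map]
    refine List.map_congr_left ?_
    intro j _
    by_cases h : (j : Int) < r <;> simp [Function.comp, ← hr, ← hce, ← hfl, h]
  have hlen : (pvMakeList t c d).length = n := by
    unfold pvMakeList
    rw [hrng]
    simp
  set k := min r.toNat n with hk
  have hfirsts : (pvMakeList t c d).map Prod.fst
      = List.replicate k ce ++ List.replicate (n - k) fl := by
    rw [hmap, pvFirsts_eq]
  -- the fallback head
  obtain ⟨p, rest, hlist⟩ : ∃ p rest, pvMakeList t c d = p :: rest := by
    cases h : pvMakeList t c d with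
    | nil => rw [h] at hlen; simp at hlen; omega
    | cons p rest => exact ⟨p, rest, rfl⟩
  have hscan : pvFindSplit (pvMakeList t c d) 0
      = pvScanFst (List.replicate k ce ++ List.replicate (n - k) fl) 0 := by
    rw [pvFindSplit_eq_scanFst, hfirsts]
  by_cases hce_fl : ce = fl
  · -- uniform list: scan finds nothing
    have hnone : pvFindSplit (pvMakeList t c d) 0 = none := by
      rw [hscan, hce_fl, ← List.replicate_add]
      have : k + (n - k) = n := by omega
      rw [this, pvScanFst_replicate]
    rw [hlist] at hnone
    have hhead : p.1 = fl := by
      have h2 := congrArg List.head? hfirsts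
      rw [hlist, pvHead_blocks _ _ _ _ (by omega)] at h2
      simp at h2
      rw [h2]
      split <;> [rfl; exact hce_fl]
    have hlen2 : ((p :: rest).length : Int) = c := by rw [← hlist, hlen]; omega
    simp only [cal_core_py, cal_core_py_alt, ← hr, ← hce, ← hfl, hnone, hlist, hlen2, hhead]
    simp [hce_fl]
  · by_cases hr0 : 0 < r
    · by_cases hrc : r < c
      · -- split at r - 1
        have hsome : pvFindSplit (pvMakeList t c d) 0 = some ((k : Int) - 1, ce, fl) := by
          rw [hscan, pvScanFst_two_blocks _ _ _ _ _ (by omega) (by omega) hce_fl]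
          congr 2
          omega
        have hkr : (k : Int) = r := by omega
        simp only [cal_core_py, cal_core_py_alt, ← hr, ← hce, ← hfl, hsome, hkr]
        simp [hr0, hrc, hce_fl]
      · -- r ≥ c : all ceil
        have hk_eq : k = n := by omega
        have hnone : pvFindSplit (pvMakeList t c d) 0 = none := by
          rw [hscan, hk_eq]
          simp [pvScanFst_replicate]
        rw [hlist] at hnone
        have hhead : p.1 = ce := by
          have h2 := congrArg List.head? hfirsts
          rw [hlist, pvHead_blocks _ _ _ _ (by omega)] at h2
          simp at h2
          rw [h2, if_neg (by omega)]
        have hlen2 : ((p :: rest).length : Int) = c := by rw [← hlist, hlen]; omega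
        simp only [cal_core_py, cal_core_py_alt, ← hr, ← hce, ← hfl, hnone, hlist, hlen2, hhead]
        have hcond : ¬ (0 < r ∧ r < c ∧ ¬ ce = fl) := by
          intro h; exact absurd h.2.1 (by omega)
        simp [hr0]
        intro h1 _
        exact absurd h1 hrc
    · -- r ≤ 0 : all floor
      have hk_eq : k = 0 := by omega
      have hnone : pvFindSplit (pvMakeList t c d) 0 = none := by
        rw [hscan, hk_eq]
        simp [pvScanFst_replicate]
      rw [hlist] at hnone
      have hhead : p.1 = fl := by
        have h2 := congrArg List.head? hfirsts
        rw [hlist, pvHead_blocks _ _ _ _ (by omega)] at h2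
        simp at h2
        rw [h2, if_pos hk_eq]
      have hlen2 : ((p :: rest).length : Int) = c := by rw [← hlist, hlen]; omega
      simp only [cal_core_py, cal_core_py_alt, ← hr, ← hce, ← hfl, hnone, hlist, hlen2, hhead]
      have hcond : ¬ (0 < r ∧ r < c ∧ ¬ ce = fl) := by
        intro h; exact absurd h.1 hr0
      simp [hr0]

-- ===== VERDICT (by name: the statement is the Claim_ definition above) =====
theorem cal_core_py_spec : Claim_equal_cal_core_py := by
  intro t c d _ pre
  unfold Spec_cal_core_py
  exact pvMain t c d pre.1 pre.2
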